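-- pv_equiv track=rewrite | github.com/catapult-project/catapult | generate_telemetry_build.py | GetDirCondition
-- ===== SOURCE A (Python) =====
-- EXCLUDED_PATHS = [
--   {
--     # needed for --chromium option; can remove once this CL lands.
--     "path": "BUILD.gn",
--   },
--   {
--     "path": "common/node_runner",
--   },
--   {
--     "path": "docs",
--   },
--   {
--     "path": "experimental",
--   },
--   {
--     # needed for --chromium option; can remove once this CL lands.
--     "path": "generate_telemetry_build.py",
--   },
--   {
--     "path": "telemetry/telemetry/data",
--   },
--   {
--     "path": "telemetry/telemetry/bin",
--   },
--   {
--     "path": "telemetry/telemetry/internal/bin",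
--   },
--   {
--     # needed for --check option
--     "path": "TEMP.gn",
--   },
--   {
--     "path": "third_party/google-endpoints",
--   },
--   {
--     "path": "third_party/Paste",
--   },
--   {
--     "path": "third_party/polymer2",
--   },
--   {
--     "path": "third_party/vinn/third_party/v8/linux/arm",
--     "condition": "is_chromeos",
--   },
--   {
--     "path": "third_party/vinn/third_party/v8/linux/mips",
--     "condition": "is_chromeos",
--   },
--   {
--     "path": "third_party/vinn/third_party/v8/linux/mips64",
--     "condition": "is_chromeos",
--   },
--   {
--     "path": "third_party/vinn/third_party/v8/linux/x86_64",
--     "condition": "is_linux || is_android",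
--   },
--   {
--     "path": "third_party/vinn/third_party/v8/mac",
--     "condition": "is_mac",
--   },
--   {
--     "path": "third_party/vinn/third_party/v8/win",
--     "condition": "is_win",
--   },
--   {
--     "path": "tracing/test_data",
--   },
-- ]
--
-- def GetDirCondition(rel_path):
--   # Return 'true' if the dir should be included; return 'false' if it should
--   # be excluded; return a condition string if it should only be included if
--   # the condition is true; return 'expand' if some files or sub-dirs under it
--   # are excluded or conditionally included, so the parser needs to go inside
--   # the dir and process further.
--   processed_rel_path = rel_path.replace('\\', '/')
--   for exclusion in EXCLUDED_PATHS:
--     assert 'path' in exclusion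
--     if exclusion['path'] == processed_rel_path:
--       if 'condition' in exclusion:
--         return exclusion['condition']
--       else:
--         return 'false'
--     elif exclusion['path'].startswith(processed_rel_path + '/'):
--       return 'expand'
--   return 'true'
-- ===== SOURCE B (Python) =====
-- EXCLUDED_PATHS = [
--   {"path": "BUILD.gn"},
--   {"path": "common/node_runner"},
--   {"path": "docs"},
--   {"path": "experimental"},
--   {"path": "generate_telemetry_build.py"},
--   {"path": "telemetry/telemetry/data"},
--   {"path": "telemetry/telemetry/bin"},
--   {"path": "telemetry/telemetry/internal/bin"},
--   {"path": "TEMP.gn"},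
--   {"path": "third_party/google-endpoints"},
--   {"path": "third_party/Paste"},
--   {"path": "third_party/polymer2"},
--   {"path": "third_party/vinn/third_party/v8/linux/arm", "condition": "is_chromeos"},
--   {"path": "third_party/vinn/third_party/v8/linux/mips", "condition": "is_chromeos"},
--   {"path": "third_party/vinn/third_party/v8/linux/mips64", "condition": "is_chromeos"},
--   {"path": "third_party/vinn/third_party/v8/linux/x86_64", "condition": "is_linux || is_android"},
--   {"path": "third_party/vinn/third_party/v8/mac", "condition": "is_mac"},
--   {"path": "third_party/vinn/third_party/v8/win", "condition": "is_win"},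
--   {"path": "tracing/test_data"},
-- ]
--
-- # Precomputed once at module load: exact-path -> answer table, and the set of
-- # all proper ancestor directories of excluded paths (whose answer is 'expand').
-- _TABLE = {}
-- _ANCESTORS = set()
-- for _e in EXCLUDED_PATHS:
--   _p = _e["path"]
--   _TABLE[_p] = _e.get("condition", "false")
--   _prefix = ""
--   for _ch in _p:
--     if _ch == '/':
--       _ANCESTORS.add(_prefix)
--     _prefix += _ch
--
--
-- def GetDirCondition(rel_path):
--   processed_rel_path = rel_path.replace('\\', '/')
--   if processed_rel_path in _TABLE:
--     return _TABLE[processed_rel_path]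
--   if processed_rel_path in _ANCESTORS:
--     return 'expand'
--   return 'true'
-- ===== Notes on version B (the rewrite author's own statement) =====
-- stated objective: idiomatic
-- what changed: Replaces the per-call interleaved linear scan (equality plus startswith test against every exclusion entry) by two structures precomputed once at module load: a dict mapping each excluded path to its answer and a set of all proper ancestor directories of excluded paths; the function is then a normalize + two lookups.
import Mathlib
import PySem

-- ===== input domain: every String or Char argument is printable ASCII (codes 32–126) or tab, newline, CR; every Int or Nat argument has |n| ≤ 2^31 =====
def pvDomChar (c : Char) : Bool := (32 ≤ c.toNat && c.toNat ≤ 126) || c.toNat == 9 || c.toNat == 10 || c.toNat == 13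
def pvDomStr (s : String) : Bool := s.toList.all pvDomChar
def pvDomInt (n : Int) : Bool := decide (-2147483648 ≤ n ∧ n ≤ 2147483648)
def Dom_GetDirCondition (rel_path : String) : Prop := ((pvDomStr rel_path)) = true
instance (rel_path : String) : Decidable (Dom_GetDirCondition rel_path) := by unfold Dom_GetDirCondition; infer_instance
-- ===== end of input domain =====

-- B precomputes a path→answer table and the set of proper ancestor directories of the
-- excluded paths once, turning A's per-call interleaved linear scan into two lookups.

-- ===== PORT A =====
-- module-level constant EXCLUDED_PATHS: (path, optional condition), in source order
def pvExcluded : List (String × Option String) := [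
  ("BUILD.gn", none), ("common/node_runner", none), ("docs", none), ("experimental", none),
  ("generate_telemetry_build.py", none), ("telemetry/telemetry/data", none),
  ("telemetry/telemetry/bin", none), ("telemetry/telemetry/internal/bin", none),
  ("TEMP.gn", none), ("third_party/google-endpoints", none), ("third_party/Paste", none),
  ("third_party/polymer2", none),
  ("third_party/vinn/third_party/v8/linux/arm", some "is_chromeos"),
  ("third_party/vinn/third_party/v8/linux/mips", some "is_chromeos"),
  ("third_party/vinn/third_party/v8/linux/mips64", some "is_chromeos"),
  ("third_party/vinn/third_party/v8/linux/x86_64", some "is_linux || is_android"),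
  ("third_party/vinn/third_party/v8/mac", some "is_mac"),
  ("third_party/vinn/third_party/v8/win", some "is_win"),
  ("tracing/test_data", none)]

-- A's 'for exclusion in EXCLUDED_PATHS' loop
def pvLoopA : List (String × Option String) → String → String
  | [], _ => "true"
  | (path, cond) :: rest, p =>
    if path = p then
      match cond with
      | some c => c
      | none => "false"
    else if PySem.Str.startswith path (p ++ "/") then "expand"
    else pvLoopA rest p

def GetDirCondition (rel_path : String) : String :=
  pvLoopA pvExcluded (PySem.Str.replace rel_path "\\" "/")

-- ===== PORT B =====
-- inner 'for _ch in _p' loop of B's module-load precomputation: adds every proper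
-- ancestor prefix of the path to the set
def pvAncLoop : List Char → String → PySem.Set String → PySem.Set String
  | [], _, s => s
  | c :: cs, pre, s =>
      pvAncLoop cs (pre.push c) (if c = '/' then PySem.Set.add s pre else s)

-- _TABLE: excluded path → its answer ('false' or the condition string)
def pvTable : PySem.Dict String String :=
  pvExcluded.foldl (fun d e => d.insert e.1 (e.2.getD "false")) PySem.Dict.empty

-- _ANCESTORS: all proper ancestor directories of excluded paths
def pvAncestors : PySem.Set String :=
  pvExcluded.foldl (fun s e => pvAncLoop e.1.toList "" s) PySem.Set.empty

def GetDirCondition_alt (rel_path : String) : String :=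
  let processed := PySem.Str.replace rel_path "\\" "/"
  match pvTable.get? processed with
  | some v => v
  | none => if PySem.Set.contains pvAncestors processed then "expand" else "true"

-- ===== PRECONDITION & SPEC =====
def Spec_GetDirCondition (rel_path : String) (out : String) : Prop := out = GetDirCondition_alt rel_path
instance (rel_path : String) (out : String) : Decidable (Spec_GetDirCondition rel_path out) := by unfold Spec_GetDirCondition; infer_instance

-- ===== CLAIM (what is proved, stated in full; the proofs are below) =====
def Claim_equal_GetDirCondition : Prop := ∀ (rel_path : String), Dom_GetDirCondition rel_path → Spec_GetDirCondition rel_path (GetDirCondition rel_path)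

-- ===== LEMMAS AND PROOFS =====

-- proof-side characterisation of the proper ancestor prefixes of a char list
def pvAncList : List Char → List (List Char)
  | [] => []
  | c :: cs => (if c = '/' then [([] : List Char)] else []) ++ (pvAncList cs).map (c :: ·)

lemma mem_pvAncList (l : List Char) : ∀ p, p ∈ pvAncList l ↔ p ++ ['/'] <+: l := by
  induction l with
  | nil => intro p; simp [pvAncList]
  | cons c cs ih =>
    intro p
    cases p with
    | nil => simp [pvAncList, List.cons_prefix_cons, eq_comm]
    | cons a q => simp [pvAncList, List.cons_prefix_cons, ih, and_comm, eq_comm]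

lemma mem_pvAncLoop (l : List Char) : ∀ (pre : String) (s : PySem.Set String) (x : String),
    x ∈ pvAncLoop l pre s ↔ x ∈ s ∨ ∃ q ∈ pvAncList l, x = String.ofList (pre.toList ++ q) := by
  induction l with
  | nil => intro pre s x; simp [pvAncLoop, pvAncList]
  | cons c cs ih =>
    intro pre s x
    simp only [pvAncLoop, ih]
    split_ifs with hc
    · subst hc
      simp [pvAncList, PySem.Set.mem_add, List.append_assoc, or_assoc]
    · simp [pvAncList, hc, List.append_assoc]

lemma startswith_iff_anc (L x : String) :
    PySem.Str.startswith L (x ++ "/") = true ↔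
      ∃ q ∈ pvAncList L.toList, x = String.ofList q := by
  constructor
  · intro hs
    refine ⟨x.toList, ?_, by simp⟩
    rw [mem_pvAncList]
    simpa [PySem.Chars.startswith_iff] using hs
  · rintro ⟨q, hq, rfl⟩
    rw [mem_pvAncList] at hq
    simp [PySem.Chars.startswith_iff]
    simpa using hq

lemma mem_foldl_ancLoop (x : String) : ∀ (l : List (String × Option String)) (s : PySem.Set String),
    x ∈ l.foldl (fun s e => pvAncLoop e.1.toList "" s) s ↔
      x ∈ s ∨ ∃ e ∈ l, PySem.Str.startswith e.1 (x ++ "/") = true := by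
  intro l
  induction l with
  | nil => intro s; simp
  | cons e rest ih =>
    intro s
    simp only [List.foldl_cons, ih, mem_pvAncLoop, List.mem_cons, startswith_iff_anc]
    constructor
    · rintro ((h | ⟨q, hq, rfl⟩) | ⟨e', he', hq⟩)
      · exact Or.inl h
      · exact Or.inr ⟨e, Or.inl rfl, q, hq, by simp⟩
      · exact Or.inr ⟨e', Or.inr he', hq⟩
    · rintro (h | ⟨e', (rfl | he'), q, hq, rfl⟩)
      · exact Or.inl (Or.inl h)
      · exact Or.inl (Or.inr ⟨q, hq, by simp⟩)
      · exact Or.inr ⟨e', he', q, hq, rfl⟩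

lemma mem_pvAncestors (x : String) :
    x ∈ pvAncestors ↔ ∃ e ∈ pvExcluded, PySem.Str.startswith e.1 (x ++ "/") = true := by
  simpa using mem_foldl_ancLoop x pvExcluded PySem.Set.empty

lemma get?_of_mem_map_items {l : List (String × Option String)} {p : String} {v : String}
    (h : (PySem.Dict.mk (l.map (fun e => (e.1, e.2.getD "false")))).get? p = some v) :
    ∃ e ∈ l, e.1 = p := by
  induction l with
  | nil => simp [PySem.Dict.get?] at h
  | cons e rest ih =>
    rw [List.map_cons, PySem.Dict.get?_mk_cons] at h
    by_cases he : e.1 = p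
    · exact ⟨e, List.mem_cons_self, he⟩
    · rw [if_neg (by simpa using he)] at h
      obtain ⟨e', he', hp⟩ := ih h
      exact ⟨e', List.mem_cons_of_mem _ he', hp⟩

-- the single interleaved scan equals lookup-then-ancestor-test, provided no excluded
-- path is an ancestor of another excluded path
lemma pvLoopA_eq (l : List (String × Option String)) (p : String)
    (H : ∀ e ∈ l, ∀ e' ∈ l, PySem.Str.startswith e'.1 (e.1 ++ "/") = false) :
    pvLoopA l p =
      match (PySem.Dict.mk (l.map (fun e => (e.1, e.2.getD "false")))).get? p with
      | some v => v
      | none => if l.any (fun e => PySem.Str.startswith e.1 (p ++ "/")) then "expand" else "true" := by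
  induction l with
  | nil => rfl
  | cons e rest ih =>
    obtain ⟨a, c⟩ := e
    have hrec := ih (fun e he e' he' => H e (List.mem_cons_of_mem _ he) e' (List.mem_cons_of_mem _ he'))
    rw [List.map_cons, PySem.Dict.get?_mk_cons]
    by_cases h : a = p
    · subst h
      rw [if_pos (by simp)]
      simp only [pvLoopA]
      cases c <;> rfl
    · rw [if_neg (by simpa using h)]
      by_cases hs : PySem.Str.startswith a (p ++ "/") = true
      · have hnone : (PySem.Dict.mk (rest.map (fun e => (e.1, e.2.getD "false")))).get? p = none := by
          cases hg : (PySem.Dict.mk (rest.map (fun e => (e.1, e.2.getD "false")))).get? p with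
          | none => rfl
          | some v =>
            obtain ⟨e', he', hp⟩ := get?_of_mem_map_items hg
            have hf : PySem.Str.startswith a (p ++ "/") = false := by
              simpa [hp] using H e' (List.mem_cons_of_mem _ he') (a, c) List.mem_cons_self
            rw [hf] at hs
            cases hs
        rw [hnone]
        have hany : (((a, c) :: rest).any (fun e => PySem.Str.startswith e.1 (p ++ "/"))) = true := by
          simp only [List.any_cons]
          rw [show PySem.Str.startswith (a, c).1 (p ++ "/") = true from hs]
          simp
        rw [if_pos hany]
        simp only [pvLoopA, if_neg h, if_pos hs]
      · have hs' : PySem.Str.startswith a (p ++ "/") = false := Bool.eq_false_iff.mpr hs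
        have hstep : pvLoopA ((a, c) :: rest) p = pvLoopA rest p := by
          simp only [pvLoopA, if_neg h, if_neg hs]
        rw [hstep, hrec]
        cases (PySem.Dict.mk (rest.map (fun e => (e.1, e.2.getD "false")))).get? p with
        | some v => rfl
        | none =>
          have hcons : (((a, c) :: rest).any fun e => PySem.Str.startswith e.1 (p ++ "/"))
              = (rest.any fun e => PySem.Str.startswith e.1 (p ++ "/")) := by
            rw [List.any_cons]
            show (PySem.Str.startswith a (p ++ "/") || _) = _
            rw [hs', Bool.false_or]
          simp only [hcons]

set_option maxRecDepth 100000 in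
lemma pvTable_eq : pvTable = PySem.Dict.mk (pvExcluded.map (fun e => (e.1, e.2.getD "false"))) := by
  decide

set_option maxRecDepth 100000 in
lemma pvExcluded_no_nesting :
    ∀ e ∈ pvExcluded, ∀ e' ∈ pvExcluded, PySem.Str.startswith e'.1 (e.1 ++ "/") = false := by
  decide

lemma pvKey (p : String) :
    pvLoopA pvExcluded p =
      match pvTable.get? p with
      | some v => v
      | none => if PySem.Set.contains pvAncestors p then "expand" else "true" := by
  rw [pvTable_eq, pvLoopA_eq pvExcluded p pvExcluded_no_nesting]
  cases (PySem.Dict.mk (pvExcluded.map (fun e => (e.1, e.2.getD "false")))).get? p with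
  | some v => rfl
  | none =>
    have hb : (pvExcluded.any fun e => PySem.Str.startswith e.1 (p ++ "/")) = PySem.Set.contains pvAncestors p := by
      rw [Bool.eq_iff_iff, List.any_eq_true, PySem.Set.contains_iff, mem_pvAncestors]
    simp only [hb]

-- ===== VERDICT (by name: the statement is the Claim_ definition above) =====
theorem GetDirCondition_spec : Claim_equal_GetDirCondition := by
  intro rel_path _
  unfold Spec_GetDirCondition GetDirCondition GetDirCondition_alt
  exact pvKey (PySem.Str.replace rel_path "\\" "/")
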